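-- pv_equiv track=rewrite | github.com/FinMind/FinMind | FinMind/plotting/kline.py | gen_pos_top_height
-- ===== SOURCE A (Python) =====
-- import typing
--
-- def gen_pos_top_height(plot_list: typing.List[typing.Any]):
--     plot_list = [plot for plot in plot_list if plot]
--     plot_index = [i + 1 for i in range(len(plot_list))]
--     sub_graph_count = len(plot_index)
--     border = 5
--     if sub_graph_count == 1:
--         pos_top_list = [5, 65]
--         height_list = [50, 20]
--     else:
--         pos_top_list = [5]
--         height_list = [30]
--         split_count = int(50 / sub_graph_count) - border
--         for i in range(sub_graph_count):
--             pos_top_list.append(pos_top_list[-1] + height_list[-1] + border)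
--             height_list.append(split_count)
--     return pos_top_list, height_list
-- ===== SOURCE B (Python) =====
-- import typing
--
-- def gen_pos_top_height(plot_list: typing.List[typing.Any]):
--     n = sum(1 for plot in plot_list if plot)
--     if n == 1:
--         return [5, 65], [50, 20]
--     split_count = int(50 / n) - 5
--     step = split_count + 5
--     pos_top_list = [5] + [40 + k * step for k in range(n)]
--     height_list = [30] + [split_count] * n
--     return pos_top_list, height_list
-- ===== Notes on version B (the rewrite author's own statement) =====
-- stated objective: simpler
-- what changed: Replaced the self-referencing accumulator loop (each append reads the just-appended last elements) with a closed-form arithmetic-progression comprehension and a replicate for the heights.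
import Mathlib
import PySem

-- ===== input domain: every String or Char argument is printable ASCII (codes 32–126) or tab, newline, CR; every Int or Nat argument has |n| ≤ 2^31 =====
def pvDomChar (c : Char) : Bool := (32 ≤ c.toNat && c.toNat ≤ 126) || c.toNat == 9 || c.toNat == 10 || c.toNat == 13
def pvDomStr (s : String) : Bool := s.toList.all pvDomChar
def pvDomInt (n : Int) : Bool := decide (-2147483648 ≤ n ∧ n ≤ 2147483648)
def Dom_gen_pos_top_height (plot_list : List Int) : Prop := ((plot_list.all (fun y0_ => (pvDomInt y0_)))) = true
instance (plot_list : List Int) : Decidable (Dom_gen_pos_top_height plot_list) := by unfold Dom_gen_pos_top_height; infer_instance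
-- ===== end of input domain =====

-- B replaces A's self-referencing accumulator loop with closed-form comprehensions (simpler); return value only, no mutation observable.

-- ===== PORT A =====
-- A filters the truthy entries, then in the general case grows both lists in a loop,
-- each step reading the just-appended last elements (list[-1] → pyGetD · (-1)).
-- int(50 / n) for 1 ≤ n ≤ 2^31 equals floor division 50 // n exactly (the quotient is
-- positive and no double rounding can cross an integer), so it is ported as floordiv.
def gen_pos_top_height (plot_list : List Int) : List Int × List Int :=
  let pl := plot_list.filter (fun p => p ≠ 0)
  let sub_graph_count := pl.length
  if sub_graph_count = 1 then ([5, 65], [50, 20])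
  else
    let split_count := PySem.Int.floordiv 50 (sub_graph_count : Int) - 5
    (List.range sub_graph_count).foldl
      (fun st _ =>
        (st.1 ++ [PySem.List.pyGetD st.1 (-1) 0 + PySem.List.pyGetD st.2 (-1) 0 + 5],
         st.2 ++ [split_count]))
      ([5], [30])

-- ===== PORT B =====
def gen_pos_top_height_alt (plot_list : List Int) : List Int × List Int :=
  let n := plot_list.countP (fun p => p ≠ 0)
  if n = 1 then ([5, 65], [50, 20])
  else
    let split_count := PySem.Int.floordiv 50 (n : Int) - 5
    let step := split_count + 5
    (5 :: (List.range n).map (fun (k : Nat) => 40 + (k : Int) * step),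
     30 :: List.replicate n split_count)

-- ===== PRECONDITION & SPEC =====
-- Pre_ excludes exactly the inputs with no truthy (nonzero) entry: there both A and B
-- raise ZeroDivisionError at split_count = int(50 / 0).
def Pre_gen_pos_top_height (plot_list : List Int) : Prop :=
  plot_list.filter (fun p => p ≠ 0) ≠ []
instance (plot_list : List Int) : Decidable (Pre_gen_pos_top_height plot_list) := by
  unfold Pre_gen_pos_top_height; infer_instance

def pvWitness_gen_pos_top_height : List Int := [1, 0, 2, 3]

def Spec_gen_pos_top_height (plot_list : List Int) (out : List Int × List Int) : Prop := out = gen_pos_top_height_alt plot_list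
instance (plot_list : List Int) (out : List Int × List Int) : Decidable (Spec_gen_pos_top_height plot_list out) := by unfold Spec_gen_pos_top_height; infer_instance

-- ===== CLAIM (what is proved, stated in full; the proofs are below) =====
def Claim_equal_gen_pos_top_height : Prop := ∀ (plot_list : List Int), Dom_gen_pos_top_height plot_list → Pre_gen_pos_top_height plot_list → Spec_gen_pos_top_height plot_list (gen_pos_top_height plot_list)

-- ===== LEMMAS AND PROOFS =====

-- A's loop, run k times with append value s, produces exactly B's closed forms.
lemma loopA_closed (s : Int) (k : Nat) :
    (List.range k).foldl
      (fun st (_ : Nat) =>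
        (st.1 ++ [PySem.List.pyGetD st.1 (-1) 0 + PySem.List.pyGetD st.2 (-1) 0 + 5],
         st.2 ++ [s]))
      (([5] : List Int), ([30] : List Int))
    = (5 :: (List.range k).map (fun (i : Nat) => 40 + (i : Int) * (s + 5)),
       30 :: List.replicate k s) := by
  induction k with
  | zero => simp
  | succ k ih =>
    rw [List.range_succ, List.foldl_append, ih]
    simp only [List.foldl_cons, List.foldl_nil]
    cases k with
    | zero =>
      simp [PySem.List.pyGetD, PySem.List.pyGet?, PySem.List.pyIdx?]
    | succ j =>
      have h1 : (5 : Int) :: (List.range (j+1)).map (fun (i : Nat) => 40 + (i : Int) * (s + 5))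
          = (5 :: (List.range j).map (fun (i : Nat) => 40 + (i : Int) * (s + 5)))
            ++ [40 + (j : Int) * (s + 5)] := by
        rw [List.range_succ]; simp
      have h2 : (30 : Int) :: List.replicate (j+1) s
          = (30 :: List.replicate j s) ++ [s] := by
        rw [List.replicate_succ']; simp
      have g1 : PySem.List.pyGetD
          ((5:Int) :: (List.range (j+1)).map (fun (i : Nat) => 40 + (i : Int) * (s + 5))) (-1) 0
          = 40 + (j : Int) * (s + 5) := by
        rw [h1]; exact PySem.List.pyGetD_neg_one_append_singleton ..
      have g2 : PySem.List.pyGetD ((30:Int) :: List.replicate (j+1) s) (-1) 0 = s := by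
        rw [h2]; exact PySem.List.pyGetD_neg_one_append_singleton ..
      rw [g1, g2]
      refine Prod.ext_iff.mpr ⟨?_, ?_⟩
      · dsimp only
        simp only [List.map_append, List.map_cons, List.map_nil, List.cons_append,
          List.cons.injEq, List.append_cancel_left_eq, true_and]
        push_cast; ring_nf
        exact ⟨trivial, trivial⟩
      · dsimp only
        simp [List.replicate_succ', List.append_assoc]

-- ===== VERDICT (by name: the statement is the Claim_ definition above) =====
theorem gen_pos_top_height_spec : Claim_equal_gen_pos_top_height := by
  intro plot_list _ _
  unfold Spec_gen_pos_top_height gen_pos_top_height gen_pos_top_height_alt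
  have hn : plot_list.countP (fun p => decide (p ≠ 0))
      = (plot_list.filter (fun p => decide (p ≠ 0))).length :=
    List.countP_eq_length_filter
  simp only [← hn]
  split
  · rfl
  · exact loopA_closed _ _
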